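-- pv_equiv track=rewrite | github.com/1REDfriend/ijudge_kmitl_PSCP | PSCP MOCK EXAM 01/vallay.py | check
-- ===== SOURCE A (Python) =====
-- def check(text_score, r) :
--     """check a vally balllllll"""
--     team_a = 0
--     team_b = 0
--     err = 0
--     c = ""
--     w = "c"
--     for i in text_score :
--         if not err :
--             if i == "A" :
--                 team_a += 1
--             else :
--                 team_b += 1
--             if r < 5 :
--                 if team_a >= 25 and team_a - team_b >= 2 :
--                     w = "a"
--                     err += 1
--                 elif team_b >= 25 and team_b - team_a >= 2 :
--                     w = "b"
--                     err += 1
--             else :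
--                 if team_a >= 15 and team_a - team_b >= 2 :
--                     w = "a"
--                     err += 1
--                 elif team_b >= 15 and team_b - team_a >= 2 :
--                     w = "b"
--                     err += 1
--             c += ""
--         else :
--             c += i
--     return c, w, f"Set {r}: A ({team_a}) | B ({team_b})"
-- ===== SOURCE B (Python) =====
-- def check(text_score, r):
--     """check a vally balllllll"""
--     team_a = 0
--     team_b = 0
--     c = ""
--     w = "c"
--     threshold = 25 if r < 5 else 15
--     for idx, ch in enumerate(text_score):
--         if ch == "A":
--             team_a += 1
--         else:
--             team_b += 1
--         lead, trail = (team_a, team_b) if team_a >= team_b else (team_b, team_a)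
--         if lead >= threshold and lead - trail >= 2:
--             w = "a" if team_a > team_b else "b"
--             c = text_score[idx + 1:]
--             break
--     return c, w, f"Set {r}: A ({team_a}) | B ({team_b})"
-- ===== Notes on version B (the rewrite author's own statement) =====
-- stated objective: simpler
-- what changed: B replaces A's err-flag full scan that keeps counting a no-op branch and accumulates leftover characters one by one with a single loop that breaks at the winning character (one unified threshold/lead-trail test instead of four duplicated branch pairs) and takes the leftover text as one O(1) slice text_score[idx+1:], avoiding quadratic-prone string += char accumulation.
import Mathlib
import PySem

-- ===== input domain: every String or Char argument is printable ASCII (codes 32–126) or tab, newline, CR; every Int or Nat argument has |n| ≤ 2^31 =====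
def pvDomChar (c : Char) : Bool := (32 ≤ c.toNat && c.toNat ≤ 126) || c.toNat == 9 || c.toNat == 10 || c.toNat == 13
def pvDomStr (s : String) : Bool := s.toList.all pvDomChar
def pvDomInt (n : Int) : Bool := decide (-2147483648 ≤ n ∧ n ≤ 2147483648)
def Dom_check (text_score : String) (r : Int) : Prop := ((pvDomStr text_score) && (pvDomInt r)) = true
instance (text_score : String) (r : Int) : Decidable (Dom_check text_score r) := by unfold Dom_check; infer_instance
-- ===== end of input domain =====

-- B rewrites A's full-scan-with-err-flag as a single loop that breaks at the winning
-- character and takes the leftover text as one slice; objective: simpler.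

-- ===== PORT A =====
-- state: (team_a, team_b, err, c, w); c kept as List Char, w as String
def checkStep (r : Int) (s : Int × Int × Int × List Char × String) (i : Char) :
    Int × Int × Int × List Char × String :=
  let (ta, tb, err, c, w) := s
  if err = 0 then
    let ta' := if i = 'A' then ta + 1 else ta
    let tb' := if i = 'A' then tb else tb + 1
    if r < 5 then
      if ta' ≥ 25 ∧ ta' - tb' ≥ 2 then (ta', tb', err + 1, c, "a")
      else if tb' ≥ 25 ∧ tb' - ta' ≥ 2 then (ta', tb', err + 1, c, "b")
      else (ta', tb', err, c, w)
    else
      if ta' ≥ 15 ∧ ta' - tb' ≥ 2 then (ta', tb', err + 1, c, "a")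
      else if tb' ≥ 15 ∧ tb' - ta' ≥ 2 then (ta', tb', err + 1, c, "b")
      else (ta', tb', err, c, w)
  else (ta, tb, err, c ++ [i], w)

def check (text_score : String) (r : Int) : String × String × String :=
  let st := text_score.toList.foldl (checkStep r) (0, 0, 0, ([] : List Char), "c")
  (String.mk st.2.2.2.1, st.2.2.2.2,
   "Set " ++ PySem.Int.toStr r ++ ": A (" ++ PySem.Int.toStr st.1 ++ ") | B (" ++ PySem.Int.toStr st.2.1 ++ ")")

-- ===== PORT B =====
-- loop over the remaining characters; on a win it breaks, returning the counts, the
-- winner and the remaining suffix (= text_score[idx+1:], since rest is exactly that slice)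
def checkAltLoop (threshold : Int) (ta tb : Int) : List Char → Int × Int × List Char × String
  | [] => (ta, tb, [], "c")
  | ch :: rest =>
    let ta' := if ch = 'A' then ta + 1 else ta
    let tb' := if ch = 'A' then tb else tb + 1
    let lt := if ta' ≥ tb' then (ta', tb') else (tb', ta')
    if lt.1 ≥ threshold ∧ lt.1 - lt.2 ≥ 2 then
      (ta', tb', rest, if ta' > tb' then "a" else "b")
    else checkAltLoop threshold ta' tb' rest

def check_alt (text_score : String) (r : Int) : String × String × String :=
  let threshold : Int := if r < 5 then 25 else 15
  let st := checkAltLoop threshold 0 0 text_score.toList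
  (String.mk st.2.2.1, st.2.2.2,
   "Set " ++ PySem.Int.toStr r ++ ": A (" ++ PySem.Int.toStr st.1 ++ ") | B (" ++ PySem.Int.toStr st.2.1 ++ ")")

-- ===== PRECONDITION & SPEC =====
def Spec_check (text_score : String) (r : Int) (out : String × String × String) : Prop := out = check_alt text_score r
instance (text_score : String) (r : Int) (out : String × String × String) : Decidable (Spec_check text_score r out) := by unfold Spec_check; infer_instance

-- ===== CLAIM (what is proved, stated in full; the proofs are below) =====
def Claim_equal_check : Prop := ∀ (text_score : String) (r : Int), Dom_check text_score r → Spec_check text_score r (check text_score r)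

-- ===== LEMMAS AND PROOFS =====

-- once err = 1, A only appends the remaining characters to c
lemma foldl_err (r : Int) (l : List Char) (ta tb : Int) (c : List Char) (w : String) :
    l.foldl (checkStep r) (ta, tb, 1, c, w) = (ta, tb, 1, c ++ l, w) := by
  induction l generalizing c with
  | nil => simp
  | cons ch rest ih =>
    simp only [List.foldl_cons, checkStep]
    norm_num
    rw [ih]
    simp

-- main invariant: while err = 0 (and c, w still at their initial values), A's fold
-- computes exactly what B's loop computes
-- if B's loop reports no winner ("c"), its leftover list is empty
lemma altLoop_c_nil (T : Int) (l : List Char) (ta tb : Int)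
    (h : (checkAltLoop T ta tb l).2.2.2 = "c") : (checkAltLoop T ta tb l).2.2.1 = ([] : List Char) := by
  induction l generalizing ta tb with
  | nil => simp [checkAltLoop]
  | cons ch rest ih =>
    simp only [checkAltLoop] at h ⊢
    split_ifs at h ⊢ <;> simp_all

-- main invariant: while err = 0 (and c, w still at their initial values), A's fold
-- computes exactly what B's loop computes
lemma foldl_loop (r : Int) (l : List Char) (ta tb : Int) (c : List Char) :
    l.foldl (checkStep r) (ta, tb, 0, c, "c") =
      (let st := checkAltLoop (if r < 5 then 25 else 15) ta tb l
       if st.2.2.2 = "c" then (st.1, st.2.1, 0, c, "c")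
       else (st.1, st.2.1, 1, c ++ st.2.2.1, st.2.2.2)) := by
  induction l generalizing ta tb with
  | nil => simp [checkAltLoop]
  | cons ch rest ih =>
    simp only [List.foldl_cons, checkStep, checkAltLoop]
    generalize (if ch = 'A' then ta + 1 else ta) = ta'
    generalize (if ch = 'A' then tb else tb + 1) = tb'
    by_cases hr : r < 5 <;> simp only [hr, if_true, if_false] <;>
    [ (by_cases ha : ta' ≥ (25:Int) ∧ ta' - tb' ≥ 2);
      (by_cases ha : ta' ≥ (15:Int) ∧ ta' - tb' ≥ 2) ] <;>
    [ skip; (by_cases hb : tb' ≥ (25:Int) ∧ tb' - ta' ≥ 2);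
      skip; (by_cases hb : tb' ≥ (15:Int) ∧ tb' - ta' ≥ 2) ]
    -- win for A
    · rw [if_pos ha]
      simp only [zero_add]
      rw [foldl_err, if_pos (show ta' ≥ tb' by omega),
        if_pos (show ((ta', tb') : Int × Int).1 ≥ 25 ∧ ((ta', tb') : Int × Int).1 - ((ta', tb') : Int × Int).2 ≥ 2 from ha),
        if_pos (show ta' > tb' by omega)]
      simp
    · rw [if_neg ha, if_pos hb]
      simp only [zero_add]
      rw [foldl_err, if_neg (show ¬ ta' ≥ tb' by omega),
        if_pos (show ((tb', ta') : Int × Int).1 ≥ 25 ∧ ((tb', ta') : Int × Int).1 - ((tb', ta') : Int × Int).2 ≥ 2 from hb),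
        if_neg (show ¬ ta' > tb' by omega)]
      simp
    · rw [if_neg ha, if_neg hb]
      have hc : (if ta' ≥ tb' then (ta', tb') else (tb', ta')).1 ≥ (25:Int) ∧
          (if ta' ≥ tb' then (ta', tb') else (tb', ta')).1 -
          (if ta' ≥ tb' then (ta', tb') else (tb', ta')).2 ≥ 2 → False := by
        split <;> simp <;> omega
      rw [if_neg hc, ih]
      simp [hr]
    · rw [if_pos ha]
      simp only [zero_add]
      rw [foldl_err, if_pos (show ta' ≥ tb' by omega),
        if_pos (show ((ta', tb') : Int × Int).1 ≥ 15 ∧ ((ta', tb') : Int × Int).1 - ((ta', tb') : Int × Int).2 ≥ 2 from ha),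
        if_pos (show ta' > tb' by omega)]
      simp
    · rw [if_neg ha, if_pos hb]
      simp only [zero_add]
      rw [foldl_err, if_neg (show ¬ ta' ≥ tb' by omega),
        if_pos (show ((tb', ta') : Int × Int).1 ≥ 15 ∧ ((tb', ta') : Int × Int).1 - ((tb', ta') : Int × Int).2 ≥ 2 from hb),
        if_neg (show ¬ ta' > tb' by omega)]
      simp
    · rw [if_neg ha, if_neg hb]
      have hc : (if ta' ≥ tb' then (ta', tb') else (tb', ta')).1 ≥ (15:Int) ∧
          (if ta' ≥ tb' then (ta', tb') else (tb', ta')).1 -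
          (if ta' ≥ tb' then (ta', tb') else (tb', ta')).2 ≥ 2 → False := by
        split <;> simp <;> omega
      rw [if_neg hc, ih]
      simp [hr]

-- ===== VERDICT (by name: the statement is the Claim_ definition above) =====
theorem check_spec : Claim_equal_check := by
  intro s r _
  unfold Spec_check check check_alt
  rw [foldl_loop]
  by_cases hc : (checkAltLoop (if r < 5 then 25 else 15) 0 0 s.toList).2.2.2 = "c"
  · rw [if_pos hc]
    simp [altLoop_c_nil _ _ _ _ hc, hc]
  · rw [if_neg hc]
    simp
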